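-- pv_equiv track=rewrite | github.com/WuKunhuan163/CLITools | proj/test/runner.py | _get_error_reason
-- ===== SOURCE A (Python) =====
-- def _get_error_reason(output):
--     lines = [line.strip() for line in output.splitlines() if line.strip()]
--     if not lines:
--         return "No output"
--
--     # Search for specific markers in reverse order
--     markers = ["AssertionError:", "ModuleNotFoundError:", "TypeError:", "ValueError:", "RuntimeError:"]
--     for line in reversed(lines):
--         for marker in markers:
--             if marker in line:
--                 # Return from marker onwards
--                 idx = line.find(marker)
--                 reason = line[idx:]
--                 return reason[:100] + "..." if len(reason) > 100 else reason
--
--     # Search for any line containing "Error:"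
--     for line in reversed(lines):
--         if "Error:" in line:
--             return line[:100] + "..." if len(line) > 100 else line
--
--     # If nothing specific found, return the last line (but skip the common 'FAILED' summary if possible)
--     for line in reversed(lines):
--         if not line.startswith("FAILED ("):
--             return line[:100] + "..." if len(line) > 100 else line
--
--     return lines[-1][:100] + "..." if len(lines[-1]) > 100 else lines[-1]
-- ===== SOURCE B (Python) =====
-- def _get_error_reason(output):
--     lines = [line.strip() for line in output.splitlines() if line.strip()]
--     if not lines:
--         return "No output"
--
--     markers = ["AssertionError:", "ModuleNotFoundError:", "TypeError:", "ValueError:", "RuntimeError:"]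
--
--     def _truncate(text):
--         return text[:100] + "..." if len(text) > 100 else text
--
--     def _tier1(line):
--         for marker in markers:
--             if marker in line:
--                 return _truncate(line[line.find(marker):])
--         return None
--
--     # Single reverse pass: tier-1 short-circuits; tier-2/3 candidates are deferred.
--     tier2 = None
--     tier3 = None
--     for line in reversed(lines):
--         hit = _tier1(line)
--         if hit is not None:
--             return hit
--         if "Error:" in line and tier2 is None:
--             tier2 = _truncate(line)
--         if not line.startswith("FAILED (") and tier3 is None:
--             tier3 = _truncate(line)
--
--     if tier2 is not None:
--         return tier2
--     if tier3 is not None: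
--         return tier3
--     return _truncate(lines[-1])
-- ===== Notes on version B (the rewrite author's own statement) =====
-- stated objective: alternative
-- what changed: Replaces A's three separate reverse scans over the lines with a single reverse pass that returns immediately on a tier-1 marker hit and records deferred tier-2 ('Error:' line) and tier-3 (non-'FAILED (' line) candidates in two slots.
import Mathlib
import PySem

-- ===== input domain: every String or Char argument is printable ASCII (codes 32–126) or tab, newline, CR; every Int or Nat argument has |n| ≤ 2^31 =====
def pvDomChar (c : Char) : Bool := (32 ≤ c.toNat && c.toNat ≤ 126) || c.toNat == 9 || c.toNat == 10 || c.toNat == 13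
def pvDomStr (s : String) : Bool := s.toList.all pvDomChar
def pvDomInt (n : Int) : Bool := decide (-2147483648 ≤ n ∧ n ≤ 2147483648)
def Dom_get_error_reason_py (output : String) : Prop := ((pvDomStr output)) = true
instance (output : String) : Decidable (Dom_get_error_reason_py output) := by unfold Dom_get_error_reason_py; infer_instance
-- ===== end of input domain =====

-- B replaces A's three separate reverse scans by ONE reverse pass that short-circuits on tier-1
-- markers and defers tier-2/3 candidates (objective: alternative decomposition, same cost).


-- shared by both pythons: the identical first line and the identical per-line helpers
def pvLines (output : String) : List (List Char) :=
  ((PySem.Chars.splitlines output.toList).map PySem.Chars.strip).filter (fun l => l ≠ [])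

-- reason[:100] + "..." if len(reason) > 100 else reason
def pvTrunc (cs : List Char) : List Char :=
  if PySem.List.len cs > 100 then PySem.List.slice cs none (some 100) ++ "...".toList else cs

def pvMarkers : List (List Char) :=
  ["AssertionError:".toList, "ModuleNotFoundError:".toList, "TypeError:".toList,
   "ValueError:".toList, "RuntimeError:".toList]

-- inner 'for marker in markers: if marker in line: …return' loop (identical in A and in B's _tier1)
def pvTier1Go : List (List Char) → List Char → Option (List Char)
  | [], _ => none
  | m :: ms, l =>
    if PySem.Chars.isIn m l then
      some (pvTrunc (PySem.List.slice l (some (PySem.Chars.find l m)) none))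
    else pvTier1Go ms l

def pvTier1 (l : List Char) : Option (List Char) := pvTier1Go pvMarkers l

-- ===== PORT A =====
-- A's first reverse scan (specific markers)
def pvScan1 : List (List Char) → Option (List Char)
  | [] => none
  | l :: rest =>
    match pvTier1 l with
    | some r => some r
    | none => pvScan1 rest

-- A's second reverse scan ("Error:" anywhere)
def pvScan2 : List (List Char) → Option (List Char)
  | [] => none
  | l :: rest =>
    if PySem.Chars.isIn "Error:".toList l then some (pvTrunc l) else pvScan2 rest

-- A's third reverse scan (skip 'FAILED (' summary)
def pvScan3 : List (List Char) → Option (List Char)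
  | [] => none
  | l :: rest =>
    if PySem.Chars.startswith l "FAILED (".toList then pvScan3 rest else some (pvTrunc l)

def get_error_reason_py (output : String) : String :=
  let lines := pvLines output
  if lines = [] then "No output"
  else
    match pvScan1 lines.reverse with
    | some r => String.ofList r
    | none =>
      match pvScan2 lines.reverse with
      | some r => String.ofList r
      | none =>
        match pvScan3 lines.reverse with
        | some r => String.ofList r
        | none => String.ofList (pvTrunc (PySem.List.pyGetD lines (-1) []))

-- ===== PORT B =====
-- B's single reverse pass: inl = tier-1 early return, inr = the two deferred candidates
def pvLoopB : List (List Char) → Option (List Char) → Option (List Char) →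
    List Char ⊕ (Option (List Char) × Option (List Char))
  | [], c2, c3 => Sum.inr (c2, c3)
  | l :: rest, c2, c3 =>
    match pvTier1 l with
    | some r => Sum.inl r
    | none =>
      let c2' := if PySem.Chars.isIn "Error:".toList l && c2.isNone then some (pvTrunc l) else c2
      let c3' := if !(PySem.Chars.startswith l "FAILED (".toList) && c3.isNone then some (pvTrunc l) else c3
      pvLoopB rest c2' c3'

def get_error_reason_py_alt (output : String) : String :=
  let lines := pvLines output
  if lines = [] then "No output"
  else
    match pvLoopB lines.reverse none none with
    | Sum.inl r => String.ofList r
    | Sum.inr (c2, c3) =>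
      match c2 with
      | some r => String.ofList r
      | none =>
        match c3 with
        | some r => String.ofList r
        | none => String.ofList (pvTrunc (PySem.List.pyGetD lines (-1) []))

-- ===== PRECONDITION & SPEC =====
def Spec_get_error_reason_py (output : String) (out : String) : Prop := out = get_error_reason_py_alt output
instance (output : String) (out : String) : Decidable (Spec_get_error_reason_py output out) := by unfold Spec_get_error_reason_py; infer_instance

-- ===== CLAIM (what is proved, stated in full; the proofs are below) =====
def Claim_equal_get_error_reason_py : Prop := ∀ (output : String), Dom_get_error_reason_py output → Spec_get_error_reason_py output (get_error_reason_py output)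

-- ===== LEMMAS AND PROOFS =====
-- B's loop with accumulators equals A's three scans chained through the accumulators.
theorem pvLoopB_eq (rev : List (List Char)) (c2 c3 : Option (List Char)) :
    pvLoopB rev c2 c3 =
      match pvScan1 rev with
      | some r => Sum.inl r
      | none => Sum.inr (c2.or (pvScan2 rev), c3.or (pvScan3 rev)) := by
  induction rev generalizing c2 c3 with
  | nil => simp [pvLoopB, pvScan1, pvScan2, pvScan3]
  | cons l rest ih =>
    simp only [pvLoopB, pvScan1, pvScan2, pvScan3]
    cases h1 : pvTier1 l with
    | some r => simp
    | none =>
      rw [ih]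
      cases pvScan1 rest with
      | some r => simp
      | none =>
        cases c2 <;> cases c3 <;>
          cases h2 : PySem.Chars.isIn "Error:".toList l <;>
          cases h3 : PySem.Chars.startswith l "FAILED (".toList <;>
          simp [Option.or]

-- ===== VERDICT (by name: the statement is the Claim_ definition above) =====
theorem get_error_reason_py_spec : Claim_equal_get_error_reason_py := by
  intro output _
  unfold Spec_get_error_reason_py get_error_reason_py get_error_reason_py_alt
  by_cases h : pvLines output = []
  · simp [h]
  · simp only [h, pvLoopB_eq]
    cases pvScan1 (pvLines output).reverse with
    | some r => simp
    | none =>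
      cases pvScan2 (pvLines output).reverse <;>
        cases pvScan3 (pvLines output).reverse <;> simp [Option.or]
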